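-- pv_equiv track=rewrite | github.com/pthom/hello_imgui | tools/process_md_docs.py | parse_header_line
-- ===== SOURCE A (Python) =====
-- def parse_header_line(header_line):
--     level = len(header_line.split(' ')[0])
--     title = header_line[level + 1:]
--     anchor_title = title.lower().replace(" ", "-")
--     ignored_chars = [":", "+", ",", "!", "\"", "(", ")"]
--     for ignored_char in ignored_chars:
--         anchor_title = anchor_title.replace(ignored_char, "")
--     return level, title, anchor_title
-- ===== SOURCE B (Python) =====
-- IGNORED = ':+,!"()'
--
--
-- def parse_header_line(header_line):
--     level = len(header_line.split(' ')[0])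
--     title = header_line[level + 1:]
--     anchor_title = ''.join('-' if c == ' ' else c
--                            for c in title.lower() if c not in IGNORED)
--     return level, title, anchor_title
-- ===== Notes on version B (the rewrite author's own statement) =====
-- stated objective: simpler
-- what changed: The anchor is built in one fused filter-and-map pass over the lowered title's characters (drop ignored punctuation, map space to dash) instead of eight successive whole-string .replace scans.
import Mathlib
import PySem

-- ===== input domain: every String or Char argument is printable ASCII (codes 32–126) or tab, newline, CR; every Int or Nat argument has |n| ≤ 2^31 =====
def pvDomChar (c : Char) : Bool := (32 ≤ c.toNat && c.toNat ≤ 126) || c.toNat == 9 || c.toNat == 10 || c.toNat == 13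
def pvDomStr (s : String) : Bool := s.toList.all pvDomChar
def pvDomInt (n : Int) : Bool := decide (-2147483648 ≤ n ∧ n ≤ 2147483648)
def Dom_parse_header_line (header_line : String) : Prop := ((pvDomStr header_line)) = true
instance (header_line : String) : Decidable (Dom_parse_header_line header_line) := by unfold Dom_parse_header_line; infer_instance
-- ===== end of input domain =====

-- B replaces A's eight successive whole-string .replace passes by ONE fused
-- filter-and-map pass over the lowered title's characters (objective: simpler).

-- ===== PORT A =====
def parse_header_line (header_line : String) : Int × String × String :=
  let level : Int := PySem.Str.len (((PySem.Str.split? header_line " ").getD []).headD "")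
  let title : String := PySem.Str.slice header_line (some (level + 1)) none
  let anchor0 : String := PySem.Str.replace (PySem.Str.lower title) " " "-"
  let anchor : String :=
    [":", "+", ",", "!", "\"", "(", ")"].foldl
      (fun acc ig => PySem.Str.replace acc ig "") anchor0
  (level, title, anchor)

-- ===== PORT B =====
-- the module-level constant IGNORED = ':+,!"()' of Source B, as its character list
def pvIgnoredChars : List Char := [':', '+', ',', '!', '"', '(', ')']

def parse_header_line_alt (header_line : String) : Int × String × String :=
  let level : Int := PySem.Str.len (((PySem.Str.split? header_line " ").getD []).headD "")
  let title : String := PySem.Str.slice header_line (some (level + 1)) none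
  -- ''.join('-' if c == ' ' else c for c in title.lower() if c not in IGNORED)
  let anchor : String := String.ofList
    ((PySem.Str.lower title).toList.filterMap
      (fun c => if c ∈ pvIgnoredChars then none else some (if c = ' ' then '-' else c)))
  (level, title, anchor)

-- ===== PRECONDITION & SPEC =====
def Spec_parse_header_line (header_line : String) (out : Int × String × String) : Prop := out = parse_header_line_alt header_line
instance (header_line : String) (out : Int × String × String) : Decidable (Spec_parse_header_line header_line out) := by unfold Spec_parse_header_line; infer_instance

-- ===== CLAIM (what is proved, stated in full; the proofs are below) =====
def Claim_equal_parse_header_line : Prop := ∀ (header_line : String), Dom_parse_header_line header_line → Spec_parse_header_line header_line (parse_header_line header_line)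

-- ===== LEMMAS AND PROOFS =====

-- replace.go with a single-character pattern, fuel ≥ length: per-character flatMap
theorem replace_go_single (a : Char) (n : List Char) (l acc : List Char) (fuel : Nat)
    (h : l.length ≤ fuel) :
    PySem.Chars.replace.go [a] n fuel l acc
      = acc.reverse ++ l.flatMap (fun c => if c = a then n else [c]) := by
  induction l generalizing fuel acc with
  | nil =>
    cases fuel <;> simp [PySem.Chars.replace.go]
  | cons c t ih =>
    cases fuel with
    | zero => simp at h
    | succ f =>
      simp only [PySem.Chars.replace.go]
      by_cases hc : c = a
      · subst hc
        simp only [List.isPrefixOf, BEq.rfl, Bool.true_and, if_true,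
          List.length_singleton, List.drop_succ_cons, List.drop_zero]
        rw [ih (acc := n.reverse ++ acc) (fuel := f) (by simpa using h)]
        simp
      · have : ¬ (List.isPrefixOf [a] (c :: t) = true) := by
          simp [List.isPrefixOf]
          intro hh
          exact absurd hh.symm hc
        rw [if_neg this, ih (acc := c :: acc) (fuel := f) (by simpa using h)]
        simp [hc]

theorem replace_single (a : Char) (n l : List Char) :
    PySem.Chars.replace l [a] n = l.flatMap (fun c => if c = a then n else [c]) := by
  simp [PySem.Chars.replace, replace_go_single a n l [] l.length (le_refl _)]

-- the fused pass equals the map-then-seven-filters chain, characterised per element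
theorem chain_eq (l : List Char) :
    (((((((((l.flatMap (fun c => if c = ' ' then ['-'] else [c])).flatMap
      (fun c => if c = ':' then [] else [c])).flatMap
      (fun c => if c = '+' then [] else [c])).flatMap
      (fun c => if c = ',' then [] else [c])).flatMap
      (fun c => if c = '!' then [] else [c])).flatMap
      (fun c => if c = '"' then [] else [c])).flatMap
      (fun c => if c = '(' then [] else [c])).flatMap
      (fun c => if c = ')' then [] else [c])))
      = l.filterMap (fun c => if c ∈ pvIgnoredChars then none else some (if c = ' ' then '-' else c)) := by
  induction l with
  | nil => rfl
  | cons c t ih =>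
    by_cases hsp : c = ' '
    · subst hsp
      simp [pvIgnoredChars, ih]
    · by_cases hig : c ∈ pvIgnoredChars
      · simp only [pvIgnoredChars, List.mem_cons, List.not_mem_nil, or_false] at hig
        rcases hig with h | h | h | h | h | h | h <;> subst h <;>
          simp [pvIgnoredChars, ih]
      · simp only [pvIgnoredChars, List.mem_cons, List.not_mem_nil, or_false, not_or] at hig
        obtain ⟨h1, h2, h3, h4, h5, h6, h7⟩ := hig
        simp [pvIgnoredChars, hsp, h1, h2, h3, h4, h5, h6, h7, ih]

-- ===== VERDICT (by name: the statement is the Claim_ definition above) =====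
theorem parse_header_line_spec : Claim_equal_parse_header_line := by
  intro header_line _
  simp only [Spec_parse_header_line, parse_header_line, parse_header_line_alt,
    List.foldl_cons, List.foldl_nil]
  refine Prod.ext rfl (Prod.ext rfl ?_)
  rw [← String.toList_inj]
  simp only [PySem.Str.toList_replace, String.toList_ofList,
    show (" " : String).toList = [' '] from rfl, show ("-" : String).toList = ['-'] from rfl,
    show (":" : String).toList = [':'] from rfl, show ("+" : String).toList = ['+'] from rfl,
    show ("," : String).toList = [','] from rfl, show ("!" : String).toList = ['!'] from rfl,
    show ("\"" : String).toList = ['"'] from rfl, show ("(" : String).toList = ['('] from rfl,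
    show (")" : String).toList = [')'] from rfl, show ("" : String).toList = [] from rfl,
    replace_single]
  exact chain_eq _
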